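-- pv_equiv track=rewrite | github.com/gnsrivastava/ProjectScripts | bitwise_accuracy_calculation.py | best_bitwise_counts
-- ===== SOURCE A (Python) =====
-- def clean_ec(ec: str) -> str:
--     # remove "EC:" and spaces; keep '-' if present
--     return str(ec).replace("EC:", "").replace("EC ", "").strip()
--
-- def ec_levels(ec: str):
--     # "3.1.26.5" -> ["3","1","26","5"]
--     # if incomplete or malformed, return []
--     ec = clean_ec(ec)
--     if "-" in ec:  # treat ambiguous as prefix match only; levels from prefix part
--         ec = ec.split("-", 1)[0]
--     parts = ec.split(".")
--     if len(parts) < 1: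
--         return []
--     return parts
--
-- def bitwise_counts_for_pair(pred_ec: str, true_ec: str):
--     """
--     Returns (c1,c2,c3,c4) for this pred/true pair:
--     counts how many prefix levels match consecutively from level 1.
--     """
--     pred = ec_levels(pred_ec)
--     true = ec_levels(true_ec)
--     if not pred or not true:
--         return (0, 0, 0, 0)
--
--     maxk = min(4, len(pred), len(true))
--     k = 0
--     for i in range(maxk):
--         if pred[i] == true[i]:
--             k += 1
--         else:
--             break
--
--     return (1, 0, 0, 0) if k == 1 else \
--            (1, 1, 0, 0) if k == 2 else \
--            (1, 1, 1, 0) if k == 3 else \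
--            (1, 1, 1, 1) if k >= 4 else \
--            (0, 0, 0, 0)
--
-- def best_bitwise_counts(pred_ecs, true_ecs):
--     """
--     For one protein that can have multiple true ECs and one predicted EC (or multiple),
--     return the best matching prefix counts across all pred×true combinations.
--     """
--     best = (0, 0, 0, 0)
--     for p in pred_ecs:
--         for t in true_ecs:
--             c = bitwise_counts_for_pair(p, t)
--             # choose the combination with highest number of matched levels
--             if sum(c) > sum(best):
--                 best = c
--             if best == (1, 1, 1, 1):
--                 return best
--     return best
-- ===== SOURCE B (Python) =====
-- def _levels(ec):
--     s = str(ec).replace("EC:", "").replace("EC ", "").strip()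
--     if "-" in s:
--         s = s.split("-", 1)[0]
--     return s.split(".")
--
-- def best_bitwise_counts(pred_ecs, true_ecs):
--     # Index every true-EC level prefix (lengths 1..4) in a set, built once;
--     # then grow each prediction's prefix while it is still indexed.
--     prefixes = set()
--     for t in true_ecs:
--         lv = _levels(t)
--         for j in range(1, min(4, len(lv)) + 1):
--             prefixes.add(tuple(lv[:j]))
--     best = 0
--     for p in pred_ecs:
--         lv = _levels(p)
--         k = 0
--         while k < min(4, len(lv)) and tuple(lv[:k + 1]) in prefixes:
--             k += 1
--         if k > best:
--             best = k
--     return (int(best >= 1), int(best >= 2), int(best >= 3), int(best >= 4))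
-- ===== Notes on version B (the rewrite author's own statement) =====
-- stated objective: faster
-- what changed: B builds a set of all true-EC level prefixes (lengths 1..4) once, then for each prediction grows its prefix while it is still in that set, so the inner loop over true_ecs and the per-pair tuple/sum accumulator disappear; the 4-tuple is built once from the best prefix length.
import Mathlib
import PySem

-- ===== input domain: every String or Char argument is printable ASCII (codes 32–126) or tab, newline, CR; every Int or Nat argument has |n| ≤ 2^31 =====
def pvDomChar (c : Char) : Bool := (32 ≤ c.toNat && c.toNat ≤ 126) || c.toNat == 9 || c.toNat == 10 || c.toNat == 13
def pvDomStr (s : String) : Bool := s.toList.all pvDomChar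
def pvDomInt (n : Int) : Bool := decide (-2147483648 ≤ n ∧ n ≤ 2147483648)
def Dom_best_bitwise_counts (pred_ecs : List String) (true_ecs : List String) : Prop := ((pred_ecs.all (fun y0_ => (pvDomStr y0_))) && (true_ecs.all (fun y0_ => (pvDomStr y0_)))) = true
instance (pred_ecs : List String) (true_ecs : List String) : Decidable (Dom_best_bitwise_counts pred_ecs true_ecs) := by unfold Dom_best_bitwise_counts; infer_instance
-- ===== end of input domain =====

-- B indexes all true-EC level prefixes (lengths 1..4) in a set built once, then grows each
-- prediction's prefix while it is still indexed, replacing A's nested pred×true pair loop.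

-- ===== PORT A =====
def clean_ec (ec : String) : String :=
  PySem.Str.strip (PySem.Str.replace (PySem.Str.replace ec "EC:" "") "EC " "")

-- `.split("-", 1)[0]` and `.split(".")`: separators are non-empty literals so `splitMax?`/`split?`
-- are `some`, and a split result is never the empty list, so the `[0]` index never raises;
-- the `.getD` defaults are unreachable.
def ec_levels (ec : String) : List String :=
  let ec0 := clean_ec ec
  let ec1 := if PySem.Str.isIn "-" ec0
             then (PySem.List.pyGet? ((PySem.Str.splitMax? ec0 "-" 1).getD []) 0).getD ""
             else ec0
  let parts := (PySem.Str.split? ec1 ".").getD []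
  if parts.length < 1 then [] else parts

-- the `for i in range(maxk): if pred[i]==true[i]: k+=1 else: break` loop
def bc_kloop (pred tru : List String) (maxk i k : Nat) : Nat :=
  if i < maxk then
    if PySem.List.pyGet? pred (i : Int) = PySem.List.pyGet? tru (i : Int)
    then bc_kloop pred tru maxk (i + 1) (k + 1)
    else k
  else k
termination_by maxk - i

def bitwise_counts_for_pair (pred_ec true_ec : String) : Int × Int × Int × Int :=
  let pred := ec_levels pred_ec
  let tru := ec_levels true_ec
  if pred = [] ∨ tru = [] then (0, 0, 0, 0)
  else
    let maxk := min 4 (min pred.length tru.length)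
    let k := bc_kloop pred tru maxk 0 0
    if k = 1 then (1, 0, 0, 0)
    else if k = 2 then (1, 1, 0, 0)
    else if k = 3 then (1, 1, 1, 0)
    else if k ≥ 4 then (1, 1, 1, 1)
    else (0, 0, 0, 0)

def bc_sum : Int × Int × Int × Int → Int
  | (a, b, c, d) => a + b + c + d

-- inner `for t in true_ecs` loop; Bool = early `return` taken
def bc_inner (p : String) (ts : List String) (best : Int × Int × Int × Int) :
    (Int × Int × Int × Int) × Bool :=
  match ts with
  | [] => (best, false)
  | t :: rest =>
    let c := bitwise_counts_for_pair p t
    let best := if bc_sum c > bc_sum best then c else best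
    if best = (1, 1, 1, 1) then (best, true) else bc_inner p rest best

def bc_outer (ps ts : List String) (best : Int × Int × Int × Int) : Int × Int × Int × Int :=
  match ps with
  | [] => best
  | p :: rest =>
    match bc_inner p ts best with
    | (best', true) => best'
    | (best', false) => bc_outer rest ts best'

def best_bitwise_counts (pred_ecs : List String) (true_ecs : List String) : Int × Int × Int × Int :=
  bc_outer pred_ecs true_ecs (0, 0, 0, 0)

-- ===== PORT B =====
-- _levels: same parsing as A (deliberately), written as one function
def bb_levels (ec : String) : List String :=
  let s0 := PySem.Str.strip (PySem.Str.replace (PySem.Str.replace ec "EC:" "") "EC " "")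
  let s1 := if PySem.Str.isIn "-" s0
            then (PySem.List.pyGet? ((PySem.Str.splitMax? s0 "-" 1).getD []) 0).getD ""
            else s0
  (PySem.Str.split? s1 ".").getD []

-- the prefix index: for t in true_ecs: for j in range(1, min(4,len(lv))+1): prefixes.add(tuple(lv[:j]))
def bb_addPrefixes (acc : PySem.Set (List String)) (t : String) : PySem.Set (List String) :=
  let lv := bb_levels t
  (PySem.List.pyRange 1 (((min 4 lv.length : Nat) : Int) + 1) 1).foldl
    (fun acc j => PySem.Set.add acc (PySem.List.slice lv none (some j))) acc

def bb_prefixes (ts : List String) : PySem.Set (List String) :=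
  ts.foldl bb_addPrefixes PySem.Set.empty

-- `while k < min(4, len(lv)) and tuple(lv[:k+1]) in prefixes: k += 1`
def bb_kloop (prefixes : PySem.Set (List String)) (lv : List String) (k : Nat) : Nat :=
  if k < min 4 lv.length ∧
     PySem.Set.contains prefixes (PySem.List.slice lv none (some ((k : Int) + 1))) = true
  then bb_kloop prefixes lv (k + 1)
  else k
termination_by min 4 lv.length - k

def best_bitwise_counts_alt (pred_ecs : List String) (true_ecs : List String) :
    Int × Int × Int × Int :=
  let prefixes := bb_prefixes true_ecs
  let best := pred_ecs.foldl (fun best p =>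
      let k := bb_kloop prefixes (bb_levels p) 0
      if k > best then k else best) 0
  ((if 1 ≤ best then 1 else 0), (if 2 ≤ best then 1 else 0),
   (if 3 ≤ best then 1 else 0), (if 4 ≤ best then 1 else 0))

-- ===== PRECONDITION & SPEC =====
def Spec_best_bitwise_counts (pred_ecs : List String) (true_ecs : List String) (out : Int × Int × Int × Int) : Prop := out = best_bitwise_counts_alt pred_ecs true_ecs
instance (pred_ecs : List String) (true_ecs : List String) (out : Int × Int × Int × Int) : Decidable (Spec_best_bitwise_counts pred_ecs true_ecs out) := by unfold Spec_best_bitwise_counts; infer_instance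

-- ===== CLAIM (what is proved, stated in full; the proofs are below) =====
def Claim_equal_best_bitwise_counts : Prop := ∀ (pred_ecs : List String) (true_ecs : List String), Dom_best_bitwise_counts pred_ecs true_ecs → Spec_best_bitwise_counts pred_ecs true_ecs (best_bitwise_counts pred_ecs true_ecs)

-- ===== LEMMAS AND PROOFS =====

-- reference: length of the common prefix of two level lists, capped at c
def refK : List String → List String → Nat → Nat
  | a :: as, b :: bs, c + 1 => if a = b then refK as bs c + 1 else 0
  | _, _, _ => 0

def tupleOf (k : Nat) : Int × Int × Int × Int :=
  ((if 1 ≤ k then 1 else 0), (if 2 ≤ k then 1 else 0),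
   (if 3 ≤ k then 1 else 0), (if 4 ≤ k then 1 else 0))

theorem refK_nil_left (ts : List String) (c : Nat) : refK [] ts c = 0 := by
  cases ts <;> cases c <;> rfl

theorem refK_nil_right (ps : List String) (c : Nat) : refK ps [] c = 0 := by
  cases ps <;> cases c <;> rfl

theorem refK_zero (ps ts : List String) : refK ps ts 0 = 0 := by
  cases ps <;> cases ts <;> rfl

theorem refK_le (ps ts : List String) (c : Nat) : refK ps ts c ≤ c := by
  induction ps generalizing ts c with
  | nil => simp [refK_nil_left]
  | cons a as ih =>
    cases ts with
    | nil => simp [refK_nil_right]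
    | cons b bs =>
      cases c with
      | zero => simp [refK_zero]
      | succ c =>
        simp only [refK]
        split_ifs
        · have := ih bs c; omega
        · omega

theorem refK_le_left (ps ts : List String) (c : Nat) : refK ps ts c ≤ ps.length := by
  induction ps generalizing ts c with
  | nil => simp [refK_nil_left]
  | cons a as ih =>
    cases ts with
    | nil => simp [refK_nil_right]
    | cons b bs =>
      cases c with
      | zero => simp [refK_zero]
      | succ c =>
        simp only [refK, List.length_cons]
        split_ifs
        · have := ih bs c; omega
        · omega

theorem refK_min (ps ts : List String) (c : Nat) :
    refK ps ts (min c (min ps.length ts.length)) = refK ps ts c := by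
  induction ps generalizing ts c with
  | nil => simp [refK_nil_left]
  | cons a as ih =>
    cases ts with
    | nil => simp [refK_nil_right]
    | cons b bs =>
      cases c with
      | zero => simp [refK_zero]
      | succ c =>
        have hmin : min (c + 1) (min (a :: as).length (b :: bs).length)
            = min c (min as.length bs.length) + 1 := by
          simp only [List.length_cons]; omega
        rw [hmin]
        simp only [refK]
        split_ifs
        · rw [ih bs c]
        · rfl

-- j ≤ refK ⟺ the first j levels agree (and fit)
theorem le_refK_iff (ps ts : List String) (c j : Nat) :
    j ≤ refK ps ts c ↔ j ≤ c ∧ j ≤ ps.length ∧ j ≤ ts.length ∧ ps.take j = ts.take j := by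
  induction j generalizing ps ts c with
  | zero => simp
  | succ j ih =>
    cases ps with
    | nil => simp [refK_nil_left]
    | cons a as =>
      cases ts with
      | nil => simp [refK_nil_right]
      | cons b bs =>
        cases c with
        | zero => simp [refK_zero]
        | succ c =>
          simp only [refK, List.length_cons, List.take_succ_cons]
          by_cases hab : a = b
          · rw [if_pos hab]
            rw [Nat.add_le_add_iff_right, ih as bs c]
            subst hab
            constructor
            · rintro ⟨h1, h2, h3, h4⟩; exact ⟨by omega, by omega, by omega, by rw [h4]⟩
            · rintro ⟨h1, h2, h3, h4⟩
              exact ⟨by omega, by omega, by omega, by injection h4⟩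
          · rw [if_neg hab]
            constructor
            · omega
            · rintro ⟨-, -, -, h4⟩
              exact absurd (by injection h4) hab

theorem bc_kloop_eq (ps ts : List String) (maxk : Nat)
    (hm : maxk ≤ min ps.length ts.length) :
    ∀ i k, bc_kloop ps ts maxk i k = k + refK (ps.drop i) (ts.drop i) (maxk - i) := by
  suffices h : ∀ n i k, maxk - i ≤ n →
      bc_kloop ps ts maxk i k = k + refK (ps.drop i) (ts.drop i) (maxk - i) by
    intro i k; exact h (maxk - i) i k le_rfl
  intro n
  induction n with
  | zero =>
    intro i k h0
    rw [bc_kloop, if_neg (by omega), show maxk - i = 0 from by omega, refK_zero]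
    omega
  | succ n ihn =>
    intro i k hle
    rw [bc_kloop]
    by_cases hlt : i < maxk
    · rw [if_pos hlt]
      have hip : i < ps.length := by omega
      have hit : i < ts.length := by omega
      rw [PySem.List.pyGet?_natCast, PySem.List.pyGet?_natCast,
        List.getElem?_eq_getElem hip, List.getElem?_eq_getElem hit,
        List.drop_eq_getElem_cons hip, List.drop_eq_getElem_cons hit,
        show maxk - i = (maxk - (i + 1)) + 1 from by omega]
      simp only [refK]
      by_cases he : ps[i] = ts[i]
      · rw [if_pos (by rw [he]), if_pos he, ihn (i + 1) (k + 1) (by omega)]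
        omega
      · rw [if_neg (by simpa using he), if_neg he]
        omega
    · rw [if_neg hlt, show maxk - i = 0 from by omega, refK_zero]
      omega

def kOf (p t : String) : Nat := refK (ec_levels p) (ec_levels t) 4

theorem kOf_le (p t : String) : kOf p t ≤ 4 := refK_le _ _ _

theorem bc_chain_eq (k : Nat) :
    (if k = 1 then ((1, 0, 0, 0) : Int × Int × Int × Int)
     else if k = 2 then (1, 1, 0, 0)
     else if k = 3 then (1, 1, 1, 0)
     else if k ≥ 4 then (1, 1, 1, 1)
     else (0, 0, 0, 0)) = tupleOf k := by
  rcases k with _ | _ | _ | _ | k <;> simp [tupleOf]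

theorem pair_eq (p t : String) : bitwise_counts_for_pair p t = tupleOf (kOf p t) := by
  simp only [bitwise_counts_for_pair, kOf]
  have hk := bc_kloop_eq (ec_levels p) (ec_levels t)
    (min 4 (min (ec_levels p).length (ec_levels t).length)) (by omega) 0 0
  simp only [List.drop_zero, Nat.sub_zero, Nat.zero_add] at hk
  rw [refK_min] at hk
  rw [hk]
  by_cases hg : ec_levels p = [] ∨ ec_levels t = []
  · rw [if_pos hg]
    rcases hg with h | h <;> simp [h, refK_nil_left, refK_nil_right, tupleOf]
  · rw [if_neg hg]
    exact bc_chain_eq _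

theorem sum_tupleOf (k : Nat) (hk : k ≤ 4) : bc_sum (tupleOf k) = (k : Int) := by
  interval_cases k <;> decide

theorem tupleOf_eq_ones (k : Nat) : tupleOf k = (1, 1, 1, 1) ↔ 4 ≤ k := by
  constructor
  · intro h
    by_contra hc
    have h4 := congrArg (fun x => x.2.2.2) h
    simp [tupleOf, hc] at h4
  · intro h
    unfold tupleOf
    rw [if_pos (by omega), if_pos (by omega), if_pos (by omega), if_pos h]

theorem foldl_max_le (l : List Nat) (a : Nat) (ha : a ≤ 4) (h : ∀ x ∈ l, x ≤ 4) :
    l.foldl max a ≤ 4 := by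
  rcases PySem.List.foldl_max_mem l a with h1 | h1
  · omega
  · exact h _ h1

theorem bc_inner_eq (p : String) (ts : List String) (b : Nat) (hb : b < 4) :
    bc_inner p ts (tupleOf b) =
      (tupleOf ((ts.map (kOf p)).foldl max b),
       decide ((ts.map (kOf p)).foldl max b = 4)) := by
  induction ts generalizing b with
  | nil => simp [bc_inner, Nat.ne_of_lt hb]
  | cons t rest ih =>
    simp only [bc_inner, pair_eq]
    have hk := kOf_le p t
    have hbest : (if bc_sum (tupleOf (kOf p t)) > bc_sum (tupleOf b)
        then tupleOf (kOf p t) else tupleOf b) = tupleOf (max b (kOf p t)) := by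
      rcases Nat.lt_or_ge b (kOf p t) with h | h
      · rw [if_pos (show bc_sum (tupleOf (kOf p t)) > bc_sum (tupleOf b) from by
            rw [sum_tupleOf _ hk, sum_tupleOf _ (show b ≤ 4 from by omega)]
            exact_mod_cast h),
          Nat.max_eq_right (Nat.le_of_lt h)]
      · rw [if_neg (show ¬ bc_sum (tupleOf (kOf p t)) > bc_sum (tupleOf b) from by
            rw [sum_tupleOf _ hk, sum_tupleOf _ (show b ≤ 4 from by omega)]
            exact not_lt.mpr (by exact_mod_cast h)),
          Nat.max_eq_left h]
    rw [hbest]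
    simp only [List.map_cons, List.foldl_cons]
    by_cases h4 : max b (kOf p t) = 4
    · have hF : (rest.map (kOf p)).foldl max 4 = 4 :=
        le_antisymm
          (foldl_max_le _ _ le_rfl (by
            intro x hx
            obtain ⟨t', _, rfl⟩ := List.mem_map.1 hx
            exact kOf_le p t'))
          (PySem.List.le_foldl_max _ _).1
      simp only [h4, hF]
      rw [if_pos (show tupleOf 4 = (1, 1, 1, 1) from by decide)]
      simp
    · have hlt : max b (kOf p t) < 4 := by omega
      rw [if_neg (by rw [tupleOf_eq_ones]; omega)]
      exact ih _ hlt

theorem inner_fold_four (ts : List String) (p : String) :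
    (ts.map (kOf p)).foldl max 4 = 4 :=
  le_antisymm
    (foldl_max_le _ _ le_rfl (by
      intro x hx
      obtain ⟨t', _, rfl⟩ := List.mem_map.1 hx
      exact kOf_le p t'))
    (PySem.List.le_foldl_max _ _).1

theorem outer_fold_four (ps ts : List String) :
    ps.foldl (fun a p => (ts.map (kOf p)).foldl max a) 4 = 4 := by
  induction ps with
  | nil => rfl
  | cons p rest ih => simp only [List.foldl_cons, inner_fold_four]; exact ih

theorem bc_outer_eq (ps ts : List String) (b : Nat) (hb : b < 4) :
    bc_outer ps ts (tupleOf b) =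
      tupleOf (ps.foldl (fun a p => (ts.map (kOf p)).foldl max a) b) := by
  induction ps generalizing b with
  | nil => simp [bc_outer]
  | cons p rest ih =>
    simp only [bc_outer, List.foldl_cons]
    rw [bc_inner_eq p ts b hb]
    by_cases hF : (ts.map (kOf p)).foldl max b = 4
    · rw [hF]
      simp only [decide_true]
      rw [outer_fold_four]
    · have hFle : (ts.map (kOf p)).foldl max b ≤ 4 :=
        foldl_max_le _ _ (by omega) (by
          intro x hx
          obtain ⟨t', _, rfl⟩ := List.mem_map.1 hx
          exact kOf_le p t')
      rw [decide_eq_false hF]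
      exact ih _ (by omega)

theorem if_len_lt_one (l : List String) : (if l.length < 1 then ([] : List String) else l) = l := by
  split_ifs with h
  · exact (List.eq_nil_of_length_eq_zero (by omega)).symm
  · rfl

theorem levels_eq (ec : String) : ec_levels ec = bb_levels ec := by
  simp only [ec_levels, bb_levels]
  exact if_len_lt_one _

-- membership in the prefix index
theorem mem_bb_addPrefixes (acc : PySem.Set (List String)) (t : String) (x : List String) :
    x ∈ bb_addPrefixes acc t ↔
      x ∈ acc ∨ ∃ j : Nat, 1 ≤ j ∧ j ≤ min 4 (bb_levels t).length ∧ x = (bb_levels t).take j := by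
  simp only [bb_addPrefixes]
  generalize bb_levels t = lv
  rw [PySem.Set.mem_foldl_add]
  constructor
  · rintro (hacc | ⟨jz, hjz, rfl⟩)
    · exact Or.inl hacc
    · rw [PySem.List.mem_pyRange_one] at hjz
      obtain ⟨hj1, hj2⟩ := hjz
      refine Or.inr ⟨jz.toNat, by omega, by omega, ?_⟩
      rw [show some jz = some ((jz.toNat : Nat) : Int) from by
            rw [Int.toNat_of_nonneg (by omega)],
        PySem.List.slice_to_natCast]
  · rintro (hacc | ⟨j, h1, h2, h3⟩)
    · exact Or.inl hacc
    · refine Or.inr ⟨(j : Int), ?_, ?_⟩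
      · rw [PySem.List.mem_pyRange_one]; omega
      · rw [PySem.List.slice_to_natCast, h3]

theorem mem_bb_prefixes_aux (ts : List String) (x : List String) :
    ∀ acc : PySem.Set (List String), x ∈ ts.foldl bb_addPrefixes acc ↔
      x ∈ acc ∨ ∃ t ∈ ts, ∃ j : Nat,
        1 ≤ j ∧ j ≤ min 4 (bb_levels t).length ∧ x = (bb_levels t).take j := by
  induction ts with
  | nil => intro acc; simp
  | cons t rest ih =>
    intro acc
    rw [List.foldl_cons, ih, mem_bb_addPrefixes]
    constructor
    · rintro ((hacc | ⟨j, h1, h2, h3⟩) | ⟨t', ht', hj⟩)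
      · exact Or.inl hacc
      · exact Or.inr ⟨t, List.mem_cons_self .., j, h1, h2, h3⟩
      · exact Or.inr ⟨t', List.mem_cons_of_mem _ ht', hj⟩
    · rintro (hacc | ⟨t', ht', hj⟩)
      · exact Or.inl (Or.inl hacc)
      · rcases List.mem_cons.1 ht' with rfl | ht2
        · exact Or.inl (Or.inr hj)
        · exact Or.inr ⟨t', ht2, hj⟩

theorem mem_bb_prefixes (ts : List String) (x : List String) :
    x ∈ bb_prefixes ts ↔
      ∃ t ∈ ts, ∃ j : Nat, 1 ≤ j ∧ j ≤ min 4 (bb_levels t).length ∧ x = (bb_levels t).take j := by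
  rw [bb_prefixes, mem_bb_prefixes_aux]
  simp [PySem.Set.empty]

-- best k of one prediction against all trues, as computed by A's reference quantity
def bestK (lv : List String) (ts : List String) : Nat :=
  (ts.map (fun t => refK lv (bb_levels t) 4)).foldl max 0

theorem bestK_le (lv : List String) (ts : List String) : bestK lv ts ≤ min 4 lv.length := by
  rcases PySem.List.foldl_max_mem (ts.map (fun t => refK lv (bb_levels t) 4)) 0 with h | h
  · rw [bestK, h]; omega
  · obtain ⟨t, _, ht⟩ := List.mem_map.1 h
    rw [bestK, ← ht] at *
    have := refK_le lv (bb_levels t) 4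
    have := refK_le_left lv (bb_levels t) 4
    rw [ht]; omega

theorem le_bestK_iff (lv : List String) (ts : List String) (j : Nat) (hj : 1 ≤ j) :
    j ≤ bestK lv ts ↔ ∃ t ∈ ts, j ≤ refK lv (bb_levels t) 4 := by
  constructor
  · intro h
    rcases PySem.List.foldl_max_mem (ts.map (fun t => refK lv (bb_levels t) 4)) 0 with h1 | h1
    · rw [bestK, h1] at h; omega
    · obtain ⟨t, ht, hv⟩ := List.mem_map.1 h1
      exact ⟨t, ht, by rw [hv]; exact h⟩
  · rintro ⟨t, ht, hle⟩
    calc j ≤ refK lv (bb_levels t) 4 := hle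
      _ ≤ bestK lv ts :=
        (PySem.List.le_foldl_max _ 0).2 _ (List.mem_map_of_mem ht)

-- the membership test in B's while-loop, characterized
theorem slice_mem_iff (ts : List String) (lv : List String) (j : Nat)
    (h1 : 1 ≤ j) (h2 : j ≤ min 4 lv.length) :
    lv.take j ∈ bb_prefixes ts ↔ j ≤ bestK lv ts := by
  rw [mem_bb_prefixes, le_bestK_iff lv ts j h1]
  constructor
  · rintro ⟨t, ht, j', hj1, hj2, heq⟩
    have hlen : j = j' := by
      have := congrArg List.length heq
      simp only [List.length_take] at this
      omega
    subst hlen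
    refine ⟨t, ht, ?_⟩
    rw [le_refK_iff]
    exact ⟨by omega, by omega, by omega, heq⟩
  · rintro ⟨t, ht, hle⟩
    rw [le_refK_iff] at hle
    obtain ⟨ha, hb, hc, hd⟩ := hle
    exact ⟨t, ht, j, h1, by omega, hd⟩

theorem contains_slice_iff (ts : List String) (lv : List String) (k : Nat)
    (h2 : k + 1 ≤ min 4 lv.length) :
    PySem.Set.contains (bb_prefixes ts) (PySem.List.slice lv none (some ((k : Int) + 1))) = true
      ↔ k + 1 ≤ bestK lv ts := by
  have hc : ((k : Int) + 1) = (((k + 1 : Nat) : Nat) : Int) := by push_cast; ring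
  rw [hc, PySem.List.slice_to_natCast, PySem.Set.contains_iff,
    slice_mem_iff ts lv (k + 1) (by omega) h2]

theorem bb_kloop_eq (ts : List String) (lv : List String) :
    ∀ k, k ≤ bestK lv ts → bb_kloop (bb_prefixes ts) lv k = bestK lv ts := by
  have hB := bestK_le lv ts
  suffices h : ∀ n k, bestK lv ts - k ≤ n → k ≤ bestK lv ts →
      bb_kloop (bb_prefixes ts) lv k = bestK lv ts by
    intro k hk; exact h (bestK lv ts - k) k le_rfl hk
  intro n
  induction n with
  | zero =>
    intro k hn hk
    have hkB : k = bestK lv ts := by omega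
    rw [bb_kloop, if_neg]
    · omega
    · rintro ⟨hlt, hmem⟩
      rw [contains_slice_iff ts lv k (by omega)] at hmem
      omega
  | succ n ihn =>
    intro k hn hk
    by_cases hlt : k < bestK lv ts
    · rw [bb_kloop, if_pos, ihn (k + 1) (by omega) (by omega)]
      exact ⟨by omega, (contains_slice_iff ts lv k (by omega)).2 (by omega)⟩
    · exact ihn k (by omega) hk

-- pulling the accumulator out of a running max
theorem foldl_max_init (l : List Nat) (a : Nat) : l.foldl max a = max a (l.foldl max 0) := by
  induction l generalizing a with
  | nil => simp
  | cons x xs ih =>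
    simp only [List.foldl_cons]
    rw [ih (max a x), ih (max 0 x)]
    simp [Nat.max_assoc]

theorem kOf_eq_refK_bb (p t : String) : kOf p t = refK (bb_levels p) (bb_levels t) 4 := by
  rw [kOf, levels_eq, levels_eq]

-- ===== VERDICT (by name: the statement is the Claim_ definition above) =====
theorem best_bitwise_counts_spec : Claim_equal_best_bitwise_counts := by
  intro ps ts _
  show best_bitwise_counts ps ts = best_bitwise_counts_alt ps ts
  simp only [best_bitwise_counts, best_bitwise_counts_alt]
  rw [show ((0, 0, 0, 0) : Int × Int × Int × Int) = tupleOf 0 from by simp [tupleOf],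
    bc_outer_eq ps ts 0 (by omega)]
  have hA : ps.foldl (fun a p => (ts.map (kOf p)).foldl max a) 0
      = ps.foldl (fun best p =>
          let k := bb_kloop (bb_prefixes ts) (bb_levels p) 0
          if k > best then k else best) 0 := by
    have hf : (fun a p => (ts.map (kOf p)).foldl max a)
        = (fun best p =>
            let k := bb_kloop (bb_prefixes ts) (bb_levels p) 0
            if k > best then k else best) := by
      funext a p
      rw [bb_kloop_eq ts (bb_levels p) 0 (by omega)]
      have hfun : kOf p = fun t => refK (bb_levels p) (bb_levels t) 4 :=
        funext (kOf_eq_refK_bb p)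
      rw [hfun, foldl_max_init, ← bestK]
      rcases Nat.lt_or_ge a (bestK (bb_levels p) ts) with h | h
      · rw [if_pos h, Nat.max_eq_right (by omega)]
      · rw [if_neg (by omega), Nat.max_eq_left h]
    rw [hf]
  rw [hA]
  rfl
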